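-- pv_equiv track=rewrite | github.com/DerenB/leet-code-responses | Python/2554-MaxNumChooseInRange.py | maxCount3
-- ===== SOURCE A (Python) =====
-- def maxCount3(banned, n, maxSum) -> int:
--
--     # Get Min and Max value of the range
--     minValue = 1
--     maxValue = n + 1
--
--     # List of possible integers
--     nonBannedIntegers = []
--
--     # Sum value of non-banned Integers
--     runningTotal = 0
--
--     # Output count
--     resultCount = 0
--
--     # Loop through Banned list
--     # Add values to non-banned list if not banned integer
--     for x in range(minValue, maxValue):
--         if x in banned or x in nonBannedIntegers:
--             continue
--         else:
--             nonBannedIntegers.append(x)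
--
--     # Loop through non-banned list
--     # Check if running total greater than max sum
--     # Check if next value in list goes past max sum
--     for x in nonBannedIntegers:
--         if runningTotal > maxSum:
--             break
--
--         runningTotal += x
--
--         if runningTotal > maxSum:
--             break
--         else:
--             resultCount += 1
--
--     return resultCount
-- ===== SOURCE B (Python) =====
-- def maxCount3(banned, n, maxSum):
--     # Walk contiguous blocks of unbanned integers between sorted banned values,
--     # adding whole blocks via the closed-form sum; finish the one partial block linearly.
--     bs = sorted({b for b in banned if 1 <= b <= n})
--     total = 0
--     count = 0
--     prev = 0
--     for b in bs + [n + 1]: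
--         a, e = prev + 1, b - 1
--         if a <= e:
--             s = (a + e) * (e - a + 1) // 2
--             if total + s <= maxSum:
--                 total += s
--                 count += e - a + 1
--             else:
--                 x = a
--                 while total + x <= maxSum:
--                     total += x
--                     count += 1
--                     x += 1
--                 return count
--         prev = b
--     return count
-- ===== Notes on version B (the rewrite author's own statement) =====
-- stated objective: faster
-- what changed: A scans the whole banned list (and the growing result list) for every integer 1..n and then counts greedily one integer at a time; B sorts the deduped in-range banned values once and consumes whole unbanned blocks with the closed-form Gauss sum, finishing at most one partial block linearly.
import Mathlib
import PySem

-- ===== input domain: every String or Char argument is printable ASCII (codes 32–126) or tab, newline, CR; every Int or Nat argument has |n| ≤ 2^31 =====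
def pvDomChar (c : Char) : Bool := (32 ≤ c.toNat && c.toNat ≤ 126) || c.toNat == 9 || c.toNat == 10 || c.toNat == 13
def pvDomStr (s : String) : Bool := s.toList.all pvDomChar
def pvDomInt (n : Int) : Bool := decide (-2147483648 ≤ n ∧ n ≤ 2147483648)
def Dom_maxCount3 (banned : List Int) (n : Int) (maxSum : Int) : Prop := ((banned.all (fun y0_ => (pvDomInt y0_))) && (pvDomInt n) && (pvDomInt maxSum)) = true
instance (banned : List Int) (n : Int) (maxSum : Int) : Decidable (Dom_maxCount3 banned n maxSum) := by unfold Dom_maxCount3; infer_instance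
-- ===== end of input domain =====

-- B replaces A's quadratic membership scans and per-integer greedy loop by sorting the
-- deduped in-range banned values and consuming whole unbanned blocks via the closed-form
-- Gauss sum, finishing at most one partial block linearly (objective: faster).


-- ===== PORT A =====
-- A's second loop: greedy count over the non-banned list with a running total.
def pvA_go (maxSum : Int) : List Int → Int → Int → Int
  | [], _, cnt => cnt
  | x :: xs, tot, cnt =>
    if tot > maxSum then cnt
    else if tot + x > maxSum then cnt
    else pvA_go maxSum xs (tot + x) (cnt + 1)

def maxCount3 (banned : List Int) (n : Int) (maxSum : Int) : Int :=
  let nonBanned := (PySem.List.pyRange 1 (n + 1)).foldl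
    (fun acc x => if banned.contains x || acc.contains x then acc else acc ++ [x]) []
  pvA_go maxSum nonBanned 0 0

-- ===== PORT B =====
-- Source B's 'while total + x <= maxSum' loop of the single partial block.
-- The '1 ≤ x' conjunct is only a totality guard (B always calls with x = a ≥ 1,
-- where the loop terminates because the total strictly grows).
def pvB_part (maxSum x tot cnt : Int) : Int :=
  if h : 1 ≤ x ∧ tot + x ≤ maxSum then pvB_part maxSum (x + 1) (tot + x) (cnt + 1) else cnt
termination_by (maxSum + 1 - tot - x).toNat
decreasing_by omega

-- Source B's 'for b in bs + [n + 1]' loop over block boundaries.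
def pvB_blocks (maxSum : Int) : List Int → Int → Int → Int → Int
  | [], _, _, cnt => cnt
  | b :: rest, prev, tot, cnt =>
    let a := prev + 1
    let e := b - 1
    if a ≤ e then
      let s := PySem.Int.floordiv ((a + e) * (e - a + 1)) 2
      if tot + s ≤ maxSum then pvB_blocks maxSum rest b (tot + s) (cnt + (e - a + 1))
      else pvB_part maxSum a tot cnt
    else pvB_blocks maxSum rest b tot cnt

def maxCount3_alt (banned : List Int) (n : Int) (maxSum : Int) : Int :=
  let bs := PySem.List.sorted
    (PySem.Set.ofList (banned.filter (fun b => 1 ≤ b && b ≤ n))) (fun x => x)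
  pvB_blocks maxSum (bs ++ [n + 1]) 0 0 0

-- ===== PRECONDITION & SPEC =====
def Spec_maxCount3 (banned : List Int) (n : Int) (maxSum : Int) (out : Int) : Prop := out = maxCount3_alt banned n maxSum
instance (banned : List Int) (n : Int) (maxSum : Int) (out : Int) : Decidable (Spec_maxCount3 banned n maxSum out) := by unfold Spec_maxCount3; infer_instance

-- ===== CLAIM (what is proved, stated in full; the proofs are below) =====
def Claim_equal_maxCount3 : Prop := ∀ (banned : List Int) (n : Int) (maxSum : Int), Dom_maxCount3 banned n maxSum → Spec_maxCount3 banned n maxSum (maxCount3 banned n maxSum)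

-- ===== LEMMAS AND PROOFS =====

-- Once the total exceeds maxSum, A's greedy loop adds nothing more.
theorem pvA_go_stop (maxSum : Int) (xs : List Int) (tot cnt : Int) (h : maxSum < tot) :
    pvA_go maxSum xs tot cnt = cnt := by
  cases xs with
  | nil => rfl
  | cons x xs => simp [pvA_go, h]

theorem sum_pyRange_nonneg (a b : Int) (ha : 1 ≤ a) :
    0 ≤ (PySem.List.pyRange a b).sum := by
  apply List.sum_nonneg
  intro x hx
  have := PySem.List.mem_pyRange_one.mp hx
  omega

-- Gauss closed form for the sum of a block [a..e].
theorem sum_pyRange_closed : ∀ (k : Nat) (a e : Int), (e + 1 - a).toNat = k → a ≤ e + 1 →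
    2 * (PySem.List.pyRange a (e + 1)).sum = (a + e) * (e - a + 1) := by
  intro k
  induction k with
  | zero =>
    intro a e hk hle
    have hae : a = e + 1 := by omega
    rw [PySem.List.pyRange_one_eq_nil (by omega)]
    simp
    omega
  | succ k ih =>
    intro a e hk hle
    have hae : a ≤ e := by omega
    rw [PySem.List.pyRange_one_cons (by omega)]
    have := ih (a + 1) e (by omega) (by omega)
    simp only [List.sum_cons]
    ring_nf
    ring_nf at this
    omega

-- The floordiv B computes is exactly the block sum.
theorem floordiv_block_sum (a e : Int) (h : a ≤ e + 1) :
    PySem.Int.floordiv ((a + e) * (e - a + 1)) 2 = (PySem.List.pyRange a (e + 1)).sum := by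
  rw [← sum_pyRange_closed (e + 1 - a).toNat a e rfl h]
  rw [PySem.Int.floordiv_eq_ediv_of_pos (by omega)]
  exact Int.mul_ediv_cancel_left _ (by omega)

-- A block that fits entirely: A's greedy loop consumes it whole.
theorem pvA_go_full (maxSum : Int) : ∀ (k : Nat) (a u : Int) (rest : List Int) (tot cnt : Int),
    (u - a).toNat = k → 1 ≤ a →
    tot + (PySem.List.pyRange a u).sum ≤ maxSum →
    pvA_go maxSum (PySem.List.pyRange a u ++ rest) tot cnt
      = pvA_go maxSum rest (tot + (PySem.List.pyRange a u).sum) (cnt + (u - a).toNat) := by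
  intro k
  induction k with
  | zero =>
    intro a u rest tot cnt hk ha hfit
    rw [PySem.List.pyRange_one_eq_nil (by omega)]
    simp only [List.nil_append, List.sum_nil, add_zero, hk, Nat.cast_zero]
  | succ k ih =>
    intro a u rest tot cnt hk ha hfit
    have hcons := PySem.List.pyRange_one_cons (a := a) (b := u) (by omega)
    rw [hcons] at hfit ⊢
    have hnn : 0 ≤ (PySem.List.pyRange (a + 1) u).sum := sum_pyRange_nonneg _ _ (by omega)
    simp only [List.sum_cons] at hfit ⊢
    simp only [List.cons_append, pvA_go]
    rw [if_neg (by omega), if_neg (by omega)]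
    rw [ih (a + 1) u rest (tot + a) (cnt + 1) (by omega) (by omega) (by omega)]
    have h1 : tot + a + (PySem.List.pyRange (a + 1) u).sum
        = tot + (a + (PySem.List.pyRange (a + 1) u).sum) := by ring
    have h2 : cnt + 1 + ((u - (a + 1)).toNat : Int) = cnt + ((u - a).toNat : Int) := by
      omega
    rw [h1, h2]

-- A block that does not fit: A's greedy loop ends inside it, and agrees with
-- B's linear finishing loop.
theorem pvA_go_part (maxSum : Int) : ∀ (k : Nat) (a u : Int) (rest : List Int) (tot cnt : Int),
    (u - a).toNat = k → 1 ≤ a →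
    maxSum < tot + (PySem.List.pyRange a u).sum →
    pvA_go maxSum (PySem.List.pyRange a u ++ rest) tot cnt = pvB_part maxSum a tot cnt := by
  intro k
  induction k with
  | zero =>
    intro a u rest tot cnt hk ha hbig
    rw [PySem.List.pyRange_one_eq_nil (by omega)] at hbig ⊢
    simp only [List.sum_nil, add_zero] at hbig
    rw [pvB_part, dif_neg (by omega)]
    simpa using pvA_go_stop maxSum rest tot cnt hbig
  | succ k ih =>
    intro a u rest tot cnt hk ha hbig
    have hcons := PySem.List.pyRange_one_cons (a := a) (b := u) (by omega)
    rw [hcons] at hbig ⊢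
    simp only [List.sum_cons] at hbig
    simp only [List.cons_append, pvA_go]
    rw [pvB_part]
    by_cases hx : tot + a ≤ maxSum
    · rw [dif_pos ⟨ha, hx⟩, if_neg (by omega), if_neg (by omega)]
      exact ih (a + 1) u rest (tot + a) (cnt + 1) (by omega) (by omega) (by omega)
    · rw [dif_neg (by omega)]
      by_cases ht : maxSum < tot
      · rw [if_pos ht]
      · rw [if_neg ht, if_pos (by omega)]

-- Main invariant: A's greedy loop over the unbanned part of [prev+1..n],
-- filtered through the strictly sorted banned boundaries bs, is B's block walk.
theorem blocks_eq (maxSum n : Int) : ∀ (bs : List Int) (prev tot cnt : Int), 0 ≤ prev →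
    bs.Pairwise (· < ·) → (∀ b ∈ bs, prev < b ∧ b ≤ n) →
    pvA_go maxSum ((PySem.List.pyRange (prev + 1) (n + 1)).filter (fun x => !bs.contains x)) tot cnt
      = pvB_blocks maxSum (bs ++ [n + 1]) prev tot cnt := by
  intro bs
  induction bs with
  | nil =>
    intro prev tot cnt hprev _ _
    simp only [List.contains_eq_mem, List.nil_append]
    rw [List.filter_eq_self.mpr (by intro x hx; simp)]
    show _ = pvB_blocks maxSum [n + 1] prev tot cnt
    simp only [pvB_blocks]
    by_cases hpe : prev + 1 ≤ n + 1 - 1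
    · rw [if_pos hpe]
      have hsum := floordiv_block_sum (prev + 1) (n + 1 - 1) (by omega)
      have hs : n + 1 - 1 + 1 = n + 1 := by omega
      rw [hs] at hsum
      rw [hsum]
      by_cases hfit : tot + (PySem.List.pyRange (prev + 1) (n + 1)).sum ≤ maxSum
      · rw [if_pos hfit]
        have := pvA_go_full maxSum (n + 1 - (prev + 1)).toNat (prev + 1) (n + 1) []
          tot cnt rfl (by omega) hfit
        simp only [List.append_nil] at this
        rw [this]
        simp only [pvA_go]
        omega
      · rw [if_neg hfit]
        have := pvA_go_part maxSum (n + 1 - (prev + 1)).toNat (prev + 1) (n + 1) []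
          tot cnt rfl (by omega) (by omega)
        simpa using this
    · rw [if_neg hpe, PySem.List.pyRange_one_eq_nil (by omega)]
      simp [pvA_go]
  | cons b bs ih =>
    intro prev tot cnt hprev hpw hmem
    have hb : prev < b ∧ b ≤ n := hmem b (List.mem_cons_self ..)
    have hbs : ∀ c ∈ bs, b < c ∧ c ≤ n := by
      intro c hc
      exact ⟨(List.pairwise_cons.mp hpw).1 c hc, (hmem c (List.mem_cons_of_mem b hc)).2⟩
    have hpw' : bs.Pairwise (· < ·) := (List.pairwise_cons.mp hpw).2
    -- split the range at b
    rw [PySem.List.pyRange_one_append (prev + 1) b (n + 1) (by omega) (by omega),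
        PySem.List.pyRange_one_cons (a := b) (b := n + 1) (by omega)]
    rw [List.filter_append]
    have h1 : (PySem.List.pyRange (prev + 1) b).filter (fun x => !(b :: bs).contains x)
        = PySem.List.pyRange (prev + 1) b := by
      apply List.filter_eq_self.mpr
      intro x hx
      have hx' := PySem.List.mem_pyRange_one.mp hx
      simp only [List.contains_eq_mem, Bool.not_eq_eq_eq_not, Bool.not_true, decide_eq_false_iff_not]
      intro hmemx
      rcases List.mem_cons.mp hmemx with h | h
      · omega
      · have := (hbs x h).1; omega
    have h2 : (b :: PySem.List.pyRange (b + 1) (n + 1)).filter (fun x => !(b :: bs).contains x)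
        = (PySem.List.pyRange (b + 1) (n + 1)).filter (fun x => !bs.contains x) := by
      rw [List.filter_cons]
      rw [if_neg (by simp)]
      apply List.filter_congr
      intro x hx
      have hx' := PySem.List.mem_pyRange_one.mp hx
      simp only [List.contains_eq_mem, List.mem_cons]
      have : ¬ x = b := by omega
      simp [this]
    rw [h1, h2]
    show _ = pvB_blocks maxSum (b :: (bs ++ [n + 1])) prev tot cnt
    simp only [pvB_blocks]
    by_cases hpe : prev + 1 ≤ b - 1
    · rw [if_pos hpe]
      have hsum := floordiv_block_sum (prev + 1) (b - 1) (by omega)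
      have hs : b - 1 + 1 = b := by omega
      rw [hs] at hsum
      rw [hsum]
      by_cases hfit : tot + (PySem.List.pyRange (prev + 1) b).sum ≤ maxSum
      · rw [if_pos hfit]
        rw [pvA_go_full maxSum (b - (prev + 1)).toNat (prev + 1) b _ tot cnt
          rfl (by omega) hfit]
        rw [ih b (tot + (PySem.List.pyRange (prev + 1) b).sum) (cnt + (b - (prev + 1)).toNat)
          (by omega) hpw' hbs]
        have hc : (cnt + ((b - (prev + 1)).toNat : Int)) = cnt + (b - 1 - (prev + 1) + 1) := by
          omega
        rw [hc]
      · rw [if_neg hfit]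
        exact pvA_go_part maxSum (b - (prev + 1)).toNat (prev + 1) b _ tot cnt
          rfl (by omega) (by omega)
    · rw [if_neg hpe, PySem.List.pyRange_one_eq_nil (by omega)]
      simp only [List.nil_append]
      exact ih b tot cnt (by omega) hpw' hbs

-- A's first loop builds exactly the filtered range (the 'x in acc' test never fires).
theorem firstloop_nat (banned : List Int) : ∀ (k : Nat),
    (PySem.List.pyRange 1 (1 + (k : Int))).foldl
      (fun acc x => if banned.contains x || acc.contains x then acc else acc ++ [x]) []
    = (PySem.List.pyRange 1 (1 + (k : Int))).filter (fun x => !banned.contains x) := by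
  intro k
  induction k with
  | zero => simp [PySem.List.pyRange_one_eq_nil]
  | succ k ih =>
    have hsplit : PySem.List.pyRange 1 (1 + ((k : Int) + 1))
        = PySem.List.pyRange 1 (1 + (k : Int)) ++ [1 + (k : Int)] := by
      have : (1 : Int) + ((k : Int) + 1) = (1 + (k : Int)) + 1 := by ring
      rw [this]
      exact PySem.List.pyRange_one_succ_right (by omega)
    push_cast
    push_cast at ih
    rw [hsplit, List.foldl_append, List.filter_append, ih]
    simp only [List.foldl_cons, List.foldl_nil]
    have hnotin : ((PySem.List.pyRange 1 (1 + (k : Int))).filter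
        (fun x => !banned.contains x)).contains (1 + (k : Int)) = false := by
      simp only [List.contains_eq_mem, decide_eq_false_iff_not, List.mem_filter]
      intro ⟨hmem, _⟩
      have := PySem.List.mem_pyRange_one.mp hmem
      omega
    rw [hnotin, Bool.or_false]
    by_cases hb : banned.contains (1 + (k : Int)) = true
    · rw [if_pos hb]
      simp only [List.contains_eq_mem] at hb
      simp [hb]
    · rw [if_neg hb]
      rw [Bool.not_eq_true] at hb
      simp only [List.contains_eq_mem] at hb
      simp [hb]

theorem firstloop (banned : List Int) (n : Int) :
    (PySem.List.pyRange 1 (n + 1)).foldl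
      (fun acc x => if banned.contains x || acc.contains x then acc else acc ++ [x]) []
    = (PySem.List.pyRange 1 (n + 1)).filter (fun x => !banned.contains x) := by
  by_cases hn : n ≤ 0
  · rw [PySem.List.pyRange_one_eq_nil (by omega)]; rfl
  · have : n + 1 = 1 + (n.toNat : Int) := by omega
    rw [this]
    exact firstloop_nat banned n.toNat

-- ===== VERDICT (by name: the statement is the Claim_ definition above) =====
theorem maxCount3_spec : Claim_equal_maxCount3 := by
  intro banned n maxSum _
  unfold Spec_maxCount3 maxCount3 maxCount3_alt
  rw [firstloop]
  set fl := banned.filter (fun b => 1 ≤ b && b ≤ n) with hfl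
  set bs := PySem.List.sorted (PySem.Set.ofList fl) (fun x => x) with hbs
  have hmembs : ∀ x, x ∈ bs ↔ (x ∈ banned ∧ 1 ≤ x ∧ x ≤ n) := by
    intro x
    rw [hbs, (PySem.List.sorted_perm _ _ _).mem_iff, PySem.Set.mem_ofList, hfl,
      List.mem_filter]
    simp
  have hfe : (PySem.List.pyRange 1 (n + 1)).filter (fun x => !banned.contains x)
      = (PySem.List.pyRange (0 + 1) (n + 1)).filter (fun x => !bs.contains x) := by
    simp only [zero_add]
    apply List.filter_congr
    intro x hx
    have hx' := PySem.List.mem_pyRange_one.mp hx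
    simp only [List.contains_eq_mem]
    have hxb : x ∈ bs ↔ x ∈ banned := by
      rw [hmembs x]
      exact ⟨fun h => h.1, fun h => ⟨h, by omega, by omega⟩⟩
    simp [hxb]
  rw [hfe]
  exact blocks_eq maxSum n bs 0 0 0 (by omega)
    (by rw [hbs]; exact PySem.List.sorted_ofList_pairwise_lt fl)
    (by intro b hb; have := (hmembs b).mp hb; omega)
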